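-- pv_equiv track=rewrite | github.com/nsimeyroneinc/NSITerm2024 | python/DS0011/Ex1.py | retourner_titouan
-- ===== SOURCE A (Python) =====
-- def creer_pile_vide():
--     return []
--
-- def est_vide(P):
--     if P==[]:
--         return True
--     else:
--         return False
--
-- def empiler(P,x):
--     P.append(x)
--
-- def depiler(P):
--     if est_vide(P) == True :
--         raise IndexError("Vous avez essayé de dépiler une pile vide !")
--     else :
--         return P.pop()
--
-- def retourner_titouan(P,j):
--     Q=creer_pile_vide()
--     R=creer_pile_vide()
--     nb=0
--     while nb<j and not est_vide(P):
--         nb+=1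
--         empiler(Q,depiler(P))
--     nb=0
--     while nb<j and not est_vide(Q):
--         nb+=1
--         empiler(R,depiler(Q))
--     nb=0
--     while nb <j and not est_vide(R):
--         nb+=1
--         empiler(P,depiler(R))
--     return P
-- ===== SOURCE B (Python) =====
-- def retourner_titouan(P, j):
--     k = min(j, len(P))
--     if k > 0:
--         P[len(P)-k:] = P[len(P)-k:][::-1]
--     return P
-- ===== Notes on version B (the rewrite author's own statement) =====
-- stated objective: simpler
-- what changed: Replaced the three auxiliary-stack transfer loops by a single in-place slice reversal of the top min(j, len(P)) elements.
import Mathlib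
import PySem

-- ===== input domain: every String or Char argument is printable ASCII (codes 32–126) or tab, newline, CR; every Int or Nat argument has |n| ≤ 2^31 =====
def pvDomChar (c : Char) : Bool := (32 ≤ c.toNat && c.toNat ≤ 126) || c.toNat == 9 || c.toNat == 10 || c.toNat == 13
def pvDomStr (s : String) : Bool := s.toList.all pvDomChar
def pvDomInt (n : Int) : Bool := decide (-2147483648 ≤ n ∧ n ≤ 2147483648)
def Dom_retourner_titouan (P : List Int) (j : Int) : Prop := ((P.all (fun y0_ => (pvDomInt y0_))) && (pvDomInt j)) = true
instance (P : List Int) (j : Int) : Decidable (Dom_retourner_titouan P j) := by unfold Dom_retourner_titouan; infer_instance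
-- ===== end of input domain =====

-- B reverses the top min(j, len(P)) slice directly instead of cycling it through three
-- auxiliary stacks ('simpler'); both Pythons mutate P in place identically and are proved
-- equal on the RETURN value.

-- ===== PORT A =====
-- one while loop 'while nb<j and not est_vide(src): nb+=1; empiler(dst, depiler(src))';
-- stacks are Python lists: depiler pops the last element, empiler appends.
def pvTransfer (j : Int) (nb : Int) (src dst : List Int) : List Int × List Int :=
  if h : nb < j ∧ src ≠ [] then
    pvTransfer j (nb + 1) src.dropLast (dst ++ [src.getLast h.2])
  else (src, dst)
termination_by src.length
decreasing_by
  cases src with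
  | nil => exact absurd rfl h.2
  | cons a l => simp

def retourner_titouan (P : List Int) (j : Int) : List Int :=
  let Q : List Int := []
  let R : List Int := []
  let s1 := pvTransfer j 0 P Q
  let s2 := pvTransfer j 0 s1.2 R
  let s3 := pvTransfer j 0 s2.2 s1.1
  s3.2

-- ===== PORT B =====
def retourner_titouan_alt (P : List Int) (j : Int) : List Int :=
  let k := min j (P.length : Int)
  if 0 < k then
    let n := P.length - k.toNat
    P.take n ++ (P.drop n).reverse
  else P

-- ===== PRECONDITION & SPEC =====
def Spec_retourner_titouan (P : List Int) (j : Int) (out : List Int) : Prop := out = retourner_titouan_alt P j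
instance (P : List Int) (j : Int) (out : List Int) : Decidable (Spec_retourner_titouan P j out) := by unfold Spec_retourner_titouan; infer_instance

-- ===== CLAIM (what is proved, stated in full; the proofs are below) =====
def Claim_equal_retourner_titouan : Prop := ∀ (P : List Int) (j : Int), Dom_retourner_titouan P j → Spec_retourner_titouan P j (retourner_titouan P j)

-- ===== LEMMAS AND PROOFS =====

-- pvTransfer moves the last t = min (j-nb)⁺ |src| elements of src onto dst, reversing them.
theorem pvTransfer_spec (j : Int) (nb : Int) (src dst : List Int) :
    pvTransfer j nb src dst =
      (src.take (src.length - min (j - nb).toNat src.length),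
       dst ++ (src.drop (src.length - min (j - nb).toNat src.length)).reverse) := by
  fun_induction pvTransfer j nb src dst with
  | case1 nb src dst h ih =>
    obtain ⟨hlt, hne⟩ := h
    rw [ih]
    have hlen : 0 < src.length := List.length_pos_iff.mpr hne
    have hdl : src.dropLast.length = src.length - 1 := by simp
    have ht : min (j - (nb + 1)).toNat src.dropLast.length
        = min (j - nb).toNat src.length - 1 := by
      rw [hdl]
      omega
    have ht1 : 1 ≤ min (j - nb).toNat src.length := by omega
    have heq : src.dropLast.length - min (j - (nb+1)).toNat src.dropLast.length
        = src.length - min (j - nb).toNat src.length := by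
      rw [ht, hdl]; omega
    rw [heq]
    set n := src.length - min (j - nb).toNat src.length with hn
    have hnlt : n < src.length := by omega
    have hsrc : src = src.dropLast ++ [src.getLast hne] := (List.dropLast_append_getLast hne).symm
    rw [Prod.mk.injEq]
    constructor
    · -- take n of dropLast = take n of src
      conv_rhs => rw [hsrc]
      rw [List.take_append_of_le_length (by omega)]
    · -- dst ++ [last] ++ (dropLast.drop n).reverse = dst ++ (src.drop n).reverse
      conv_rhs => rw [hsrc]
      rw [List.drop_append_of_le_length (by omega)]
      simp
  | case2 nb src dst h =>
    have ht : min (j - nb).toNat src.length = 0 := by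
      rcases not_and_or.mp h with h1 | h1
      · have : j - nb ≤ 0 := by omega
        simp [Int.toNat_of_nonpos this]
      · have : src = [] := not_not.mp h1
        simp [this]
    simp [ht]

-- ===== VERDICT (by name: the statement is the Claim_ definition above) =====
theorem retourner_titouan_spec : Claim_equal_retourner_titouan := by
  intro P j _
  unfold Spec_retourner_titouan retourner_titouan retourner_titouan_alt
  simp only [pvTransfer_spec, List.nil_append]
  set t := min (j - 0).toNat P.length with htdef
  have htle : t ≤ P.length := by omega
  have hlen1 : ((P.drop (P.length - t)).reverse).length = t := by simp; omega
  have hmin : min (j - 0).toNat t = t := by omega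
  rw [hlen1, hmin, Nat.sub_self, List.drop_zero, List.reverse_reverse]
  have hlen2 : (P.drop (P.length - t)).length = t := by simp; omega
  rw [hlen2, hmin, Nat.sub_self, List.drop_zero]
  by_cases hpos : 0 < min j (P.length : Int)
  · have hk : (min j (P.length : Int)).toNat = t := by omega
    rw [if_pos hpos, hk]
  · have ht0 : t = 0 := by omega
    rw [if_neg hpos, ht0]
    simp
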